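-- pv_equiv track=rewrite | github.com/CrowdStrike/foundry-fn-python | src/crowdstrike/foundry/function/mapping.py | canonize_header
-- ===== SOURCE A (Python) =====
-- def canonize_header(h: str) -> str:
--     """
--     Converts a header key into its canonical version.
--     :param h: Header key.
--     :return: Canonized version.
--     """
--     canon = ''
--     upper = True
--     for c in h:
--         if upper:
--             canon += c.upper()
--         else:
--             canon += c.lower()
--
--         upper = c == '-'
--     return canon
-- ===== SOURCE B (Python) =====
-- def canonize_header(h: str) -> str:
--     return '-'.join(p[:1].upper() + p[1:].lower() for p in h.split('-'))
-- ===== Notes on version B (the rewrite author's own statement) =====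
-- stated objective: faster
-- what changed: Replaces the per-character loop with a stateful capitalize-next flag and quadratic string concatenation by splitting on the hyphen, capitalizing each segment (first char upper, rest lower) via slicing, and rejoining.
import Mathlib
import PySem

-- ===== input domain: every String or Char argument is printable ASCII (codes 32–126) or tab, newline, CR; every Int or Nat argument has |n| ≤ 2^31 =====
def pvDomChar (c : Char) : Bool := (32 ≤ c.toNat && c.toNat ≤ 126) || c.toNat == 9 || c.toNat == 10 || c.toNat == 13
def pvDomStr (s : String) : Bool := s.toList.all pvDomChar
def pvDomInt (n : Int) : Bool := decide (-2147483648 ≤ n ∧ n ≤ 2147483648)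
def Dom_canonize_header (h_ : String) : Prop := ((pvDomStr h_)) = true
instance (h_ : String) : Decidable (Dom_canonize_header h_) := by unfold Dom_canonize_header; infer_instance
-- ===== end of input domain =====

-- B canonicalizes by splitting on '-' and capitalizing each segment instead of A's per-character upper-flag loop (objective: faster, measured).

-- ===== PORT A =====
-- character loop: canon += c.upper() if upper else c.lower(); upper = (c == '-')
def canonize_header (h_ : String) : String :=
  let st := h_.toList.foldl
    (fun (st : List Char × Bool) c =>
      (st.1 ++ (if st.2 then [PySem.Chars.upperChar c] else [PySem.Chars.lowerChar c]), c == '-'))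
    ([], true)
  String.ofList st.1

-- ===== PORT B =====
-- '-'.join(p[:1].upper() + p[1:].lower() for p in h.split('-'))
def canonize_header_alt (h_ : String) : String :=
  String.ofList (PySem.Chars.join ['-']
    ((PySem.Chars.splitOn h_.toList ['-']).map
      (fun p => PySem.Chars.upper (PySem.List.slice p none (some 1))
              ++ PySem.Chars.lower (PySem.List.slice p (some 1) none))))

-- ===== PRECONDITION & SPEC =====
def Spec_canonize_header (h_ : String) (out : String) : Prop := out = canonize_header_alt h_
instance (h_ : String) (out : String) : Decidable (Spec_canonize_header h_ out) := by unfold Spec_canonize_header; infer_instance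

-- ===== CLAIM (what is proved, stated in full; the proofs are below) =====
def Claim_equal_canonize_header : Prop := ∀ (h_ : String), Dom_canonize_header h_ → Spec_canonize_header h_ (canonize_header h_)

-- ===== LEMMAS AND PROOFS =====

-- A's loop, with the accumulator factored out
def pvG : List Char → Bool → List Char
  | [], _ => []
  | c :: cs, u => (if u then PySem.Chars.upperChar c else PySem.Chars.lowerChar c) :: pvG cs (c == '-')

lemma pvFoldA (cs : List Char) : ∀ (acc : List Char) (u : Bool),
    (cs.foldl
      (fun (st : List Char × Bool) c =>
        (st.1 ++ (if st.2 then [PySem.Chars.upperChar c] else [PySem.Chars.lowerChar c]), c == '-'))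
      (acc, u)).1 = acc ++ pvG cs u := by
  induction cs with
  | nil => intro acc u; simp [pvG]
  | cons c cs ih =>
    intro acc u
    simp only [List.foldl_cons, pvG, ih]
    by_cases hu : u <;> simp [hu]

-- B's per-segment transformation
def pvCap (p : List Char) : List Char :=
  PySem.Chars.upper (p.take 1) ++ PySem.Chars.lower (p.drop 1)

lemma pvGo_eq (c : Char) : ∀ (fuel : Nat) (l cur : List Char) (acc : List (List Char)), l.length ≤ fuel →
    PySem.Chars.splitOn.go [c] fuel l cur acc
      = acc.reverse ++ List.modifyHead (cur.reverse ++ ·) (List.splitOnP (· == c) l) := by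
  intro fuel
  induction fuel with
  | zero =>
    intro l cur acc hl
    have : l = [] := List.length_eq_zero_iff.mp (Nat.le_zero.mp hl)
    subst this
    simp [PySem.Chars.splitOn.go, List.splitOnP_nil]
  | succ fuel ih =>
    intro l cur acc hl
    cases l with
    | nil => simp [PySem.Chars.splitOn.go, List.splitOnP_nil]
    | cons c' rest =>
      obtain ⟨p, ps, hS⟩ := List.exists_cons_of_ne_nil (List.splitOnP_ne_nil (· == c) rest)
      by_cases hc : c' = c
      · subst hc
        have : [c'].isPrefixOf (c' :: rest) = true := by simp [List.isPrefixOf]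
        simp only [PySem.Chars.splitOn.go, this, if_true, List.length_cons, List.length_nil,
          Nat.zero_add, List.drop_succ_cons, List.drop_zero]
        rw [ih rest [] (cur.reverse :: acc) (by simpa using hl)]
        simp [List.splitOnP_cons, hS]
      · have hpre : [c].isPrefixOf (c' :: rest) = false := by
          simp [List.isPrefixOf]; exact fun h => (hc h.symm).elim
        simp only [PySem.Chars.splitOn.go, hpre, Bool.false_eq_true, if_false]
        rw [ih rest (c' :: cur) acc (by simpa using hl)]
        simp [List.splitOnP_cons, hS, hc]

lemma pvSplitOn_eq (cs : List Char) (c : Char) :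
    PySem.Chars.splitOn cs [c] = List.splitOnP (· == c) cs := by
  unfold PySem.Chars.splitOn
  rw [pvGo_eq c (cs.length + 1) cs [] [] (by omega)]
  obtain ⟨p, ps, hS⟩ := List.exists_cons_of_ne_nil (List.splitOnP_ne_nil (· == c) cs)
  simp [hS]

-- tail of the join: every later segment contributes '-' then its capitalization
def pvRest (ps : List (List Char)) : List Char :=
  (ps.map (fun q => '-' :: pvCap q)).flatten

lemma pvJoin_eq (ps : List (List Char)) : ∀ (p : List Char),
    PySem.Chars.join ['-'] ((p :: ps).map pvCap) = pvCap p ++ pvRest ps := by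
  induction ps with
  | nil => intro p; simp [PySem.Chars.join, pvRest, List.intercalate]
  | cons q ps ih =>
    intro p
    have := ih q
    simp only [PySem.Chars.join, List.intercalate, List.map_cons, List.intersperse,
      List.flatten_cons] at this ⊢
    simp [pvRest, this]

lemma pvUpperDash : PySem.Chars.upperChar '-' = '-' := by decide
lemma pvLowerDash : PySem.Chars.lowerChar '-' = '-' := by decide

-- main invariant: A's loop result per flag value, against the split/cap/join view
lemma pvMain (cs : List Char) :
    pvG cs true = PySem.Chars.join ['-'] ((List.splitOnP (· == '-') cs).map pvCap) ∧
    pvG cs false =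
      (match List.splitOnP (· == '-') cs with
        | [] => []
        | p :: ps => PySem.Chars.lower p ++ pvRest ps) := by
  induction cs with
  | nil =>
    simp [pvG, List.splitOnP_nil, pvJoin_eq, pvCap, pvRest, PySem.Chars.upper, PySem.Chars.lower]
  | cons c cs ih =>
    obtain ⟨p, ps, hS⟩ := List.exists_cons_of_ne_nil (List.splitOnP_ne_nil (· == '-') cs)
    by_cases hc : c = '-'
    · subst hc
      have h1 : List.splitOnP (· == '-') ('-' :: cs) = [] :: p :: ps := by
        simp [List.splitOnP_cons, hS]
      constructor
      · rw [h1, pvJoin_eq]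
        have := ih.1; rw [hS] at this; rw [pvJoin_eq] at this
        simp [pvG, pvUpperDash, this, pvCap, pvRest, PySem.Chars.upper, PySem.Chars.lower]
      · rw [h1]
        have := ih.1; rw [hS] at this; rw [pvJoin_eq] at this
        simp [pvG, pvLowerDash, this, pvCap, pvRest, PySem.Chars.upper, PySem.Chars.lower]
    · have hb : (c == '-') = false := by simp [hc]
      have h1 : List.splitOnP (· == '-') (c :: cs) = (c :: p) :: ps := by
        simp [List.splitOnP_cons, hb, hS]
      have ih2 : pvG cs false = PySem.Chars.lower p ++ pvRest ps := by
        have := ih.2; rw [hS] at this; exact this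
      constructor
      · rw [h1, pvJoin_eq]
        simp [pvG, hb, ih2, pvCap, PySem.Chars.upper, PySem.Chars.lower]
      · rw [h1]
        simp [pvG, hb, ih2, PySem.Chars.lower]

-- ===== VERDICT (by name: the statement is the Claim_ definition above) =====
theorem canonize_header_spec : Claim_equal_canonize_header := by
  intro h_ _
  unfold Spec_canonize_header canonize_header canonize_header_alt
  simp only [pvFoldA, List.nil_append]
  rw [pvSplitOn_eq]
  congr 1
  rw [(pvMain h_.toList).1]
  congr 1
  apply List.map_congr_left
  intro p _
  simp [pysem, pvCap]
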